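-- pv_equiv track=rewrite | github.com/MrBrantCode/unitest_baseline | mut_generate/mist_train_taco/taco_7025/solution.py | get_min_sum
-- ===== SOURCE A (Python) =====
-- def get_min_sum(A, B, n):
--     # Find the indices of the minimum values in A and B
--     min_A_index = A.index(min(A))
--     min_B_index = B.index(min(B))
--
--     # If the indices are different, return the sum of the minimum values
--     if min_A_index != min_B_index:
--         return min(A) + min(B)
--
--     # Initialize a list to store possible sums
--     possible_sums = []
--
--     # Iterate through all pairs of indices
--     for i in range(n):
--         for j in range(n):
--             if i != j:
--                 possible_sums.append(A[i] + B[j])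
--
--     # If no valid sums were found, return -1
--     if not possible_sums:
--         return -1
--
--     # Return the minimum sum from the possible sums
--     return min(possible_sums)
-- ===== SOURCE B (Python) =====
-- def get_min_sum(A, B, n):
--     mA = min(A)
--     mB = min(B)
--     if A.index(mA) != B.index(mB):
--         return mA + mB
--     if n <= 1:
--         return -1
--     # Fallback over the first n elements: for each i the best partner is the
--     # minimum of B[:n], or its second minimum when i is the (first) argmin of B[:n].
--     Bp = B[:n]
--     m = min(Bp)
--     jb = Bp.index(m)
--     m2 = min(Bp[:jb] + Bp[jb + 1:])
--     return min(A[i] + (m if i != jb else m2) for i in range(n))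
-- ===== Notes on version B (the rewrite author's own statement) =====
-- stated objective: faster
-- what changed: The O(n^2) nested scan over all pairs i!=j is replaced by an O(n) pass: compute the minimum and second minimum of B[:n] once, and for each i add the minimum of B[:n] (or the second minimum when i is its first argmin).
import Mathlib
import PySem

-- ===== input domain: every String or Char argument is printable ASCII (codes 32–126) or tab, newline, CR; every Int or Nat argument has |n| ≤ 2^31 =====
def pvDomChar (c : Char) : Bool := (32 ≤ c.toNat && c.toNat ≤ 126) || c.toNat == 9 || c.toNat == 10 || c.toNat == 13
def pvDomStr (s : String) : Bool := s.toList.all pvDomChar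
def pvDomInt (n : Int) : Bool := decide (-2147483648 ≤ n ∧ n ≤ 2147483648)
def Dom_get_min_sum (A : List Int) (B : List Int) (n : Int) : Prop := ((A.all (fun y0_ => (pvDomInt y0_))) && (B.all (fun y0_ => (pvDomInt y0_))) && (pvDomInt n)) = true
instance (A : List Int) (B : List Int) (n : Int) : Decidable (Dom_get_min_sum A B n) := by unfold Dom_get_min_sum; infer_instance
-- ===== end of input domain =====

-- B replaces A's O(n^2) scan over all pairs i ≠ j by one O(n) pass using the
-- minimum and second minimum of B[:n]; return values agree on all of Pre_.

-- ===== PORT A =====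
def get_min_sum (A : List Int) (B : List Int) (n : Int) : Int :=
  let min_A_index := (PySem.List.index? A ((PySem.List.min? A (fun y => y)).getD 0)).getD 0
  let min_B_index := (PySem.List.index? B ((PySem.List.min? B (fun y => y)).getD 0)).getD 0
  if min_A_index ≠ min_B_index then
    (PySem.List.min? A (fun y => y)).getD 0 + (PySem.List.min? B (fun y => y)).getD 0
  else
    let possible_sums :=
      (PySem.List.pyRange 0 n 1).foldl (fun acc i =>
        (PySem.List.pyRange 0 n 1).foldl (fun acc2 j =>
          if i ≠ j then
            acc2 ++ [(PySem.List.pyGet? A i).getD 0 + (PySem.List.pyGet? B j).getD 0]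
          else acc2) acc) []
    if possible_sums = [] then -1
    else (PySem.List.min? possible_sums (fun y => y)).getD 0

-- ===== PORT B =====
def get_min_sum_alt (A : List Int) (B : List Int) (n : Int) : Int :=
  let mA := (PySem.List.min? A (fun y => y)).getD 0
  let mB := (PySem.List.min? B (fun y => y)).getD 0
  if (PySem.List.index? A mA).getD 0 ≠ (PySem.List.index? B mB).getD 0 then
    mA + mB
  else if n ≤ 1 then -1
  else
    let Bp := PySem.List.slice B none (some n)
    let m := (PySem.List.min? Bp (fun y => y)).getD 0
    let jb := (PySem.List.index? Bp m).getD 0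
    let m2 := (PySem.List.min? (PySem.List.slice Bp none (some (jb : Int)) ++
                PySem.List.slice Bp (some ((jb : Int) + 1)) none) (fun y => y)).getD 0
    (PySem.List.min? ((PySem.List.pyRange 0 n 1).map (fun i =>
        (PySem.List.pyGet? A i).getD 0 + (if i ≠ (jb : Int) then m else m2))) (fun y => y)).getD 0

-- ===== PRECONDITION & SPEC =====
-- Pre_ excludes exactly the inputs where the Python A raises: an empty A or B
-- (min/ValueError), and the quadratic fallback (equal first-argmin indices, n ≥ 2)
-- reading past the end of A or B (IndexError when n exceeds a length).
def Pre_get_min_sum (A : List Int) (B : List Int) (n : Int) : Prop :=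
  A ≠ [] ∧ B ≠ [] ∧
    ((PySem.List.index? A ((PySem.List.min? A (fun y => y)).getD 0)).getD 0 ≠
       (PySem.List.index? B ((PySem.List.min? B (fun y => y)).getD 0)).getD 0 ∨
     n ≤ 1 ∨ (n ≤ (A.length : Int) ∧ n ≤ (B.length : Int)))
instance (A : List Int) (B : List Int) (n : Int) : Decidable (Pre_get_min_sum A B n) := by
  unfold Pre_get_min_sum; infer_instance

def pvWitness_get_min_sum : List Int × List Int × Int := ([3, 1, 2], [1, 4, 2], 3)

def Spec_get_min_sum (A : List Int) (B : List Int) (n : Int) (out : Int) : Prop := out = get_min_sum_alt A B n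
instance (A : List Int) (B : List Int) (n : Int) (out : Int) : Decidable (Spec_get_min_sum A B n out) := by unfold Spec_get_min_sum; infer_instance

-- ===== CLAIM (what is proved, stated in full; the proofs are below) =====
def Claim_equal_get_min_sum : Prop := ∀ (A : List Int) (B : List Int) (n : Int), Dom_get_min_sum A B n → Pre_get_min_sum A B n → Spec_get_min_sum A B n (get_min_sum A B n)

-- ===== LEMMAS AND PROOFS =====

-- value of python min on a nonempty list: a member that is ≤ every element
theorem minD_mem_isMin (l : List Int) (h : l ≠ []) :
    (PySem.List.min? l (fun y => y)).getD 0 ∈ l ∧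
      ∀ x ∈ l, (PySem.List.min? l (fun y => y)).getD 0 ≤ x := by
  cases hm : PySem.List.min? l (fun y => y) with
  | none => exact absurd ((PySem.List.min?_eq_none_iff l (fun y => y)).mp hm) h
  | some v =>
    refine ⟨?_, ?_⟩
    · simpa using PySem.List.min?_mem hm
    · intro x hx; simpa using PySem.List.min?_isMin hm x hx

-- two nonempty lists mutually dominated have the same minimum value
theorem minD_eq_of_dominated (l1 l2 : List Int) (h1 : l1 ≠ []) (h2 : l2 ≠ [])
    (d12 : ∀ x ∈ l1, ∃ y ∈ l2, y ≤ x) (d21 : ∀ y ∈ l2, ∃ x ∈ l1, x ≤ y) :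
    (PySem.List.min? l1 (fun y => y)).getD 0 = (PySem.List.min? l2 (fun y => y)).getD 0 := by
  obtain ⟨m1, hmin1⟩ := minD_mem_isMin l1 h1
  obtain ⟨m2, hmin2⟩ := minD_mem_isMin l2 h2
  obtain ⟨y, hy, hyle⟩ := d12 _ m1
  obtain ⟨x, hx, hxle⟩ := d21 _ m2
  exact le_antisymm (le_trans (hmin1 x hx) hxle) (le_trans (hmin2 y hy) hyle)

-- an element of l at an index other than i is in l.take i ++ l.drop (i+1)
theorem mem_punctured_of_ne (l : List Int) (i j : Nat) (hj : j < l.length) (hne : j ≠ i) :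
    l[j] ∈ l.take i ++ l.drop (i + 1) := by
  rcases Nat.lt_or_ge j i with h | h
  · exact List.mem_append_left _ (by
      have : (l.take i)[j]'(by simp; omega) = l[j] := by simp
      exact this ▸ List.getElem_mem _)
  · have hij : i < j := lt_of_le_of_ne h (Ne.symm hne)
    refine List.mem_append_right _ ?_
    have : (l.drop (i + 1))[j - (i + 1)]'(by simp; omega) = l[j] := by
      simp [List.getElem_drop]; congr 1; omega
    exact this ▸ List.getElem_mem _

-- conversely each element of the punctured list sits at some index ≠ i
theorem exists_idx_of_mem_punctured (l : List Int) (i : Nat) (x : Int)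
    (hx : x ∈ l.take i ++ l.drop (i + 1)) :
    ∃ j, ∃ hj : j < l.length, j ≠ i ∧ l[j] = x := by
  rcases List.mem_append.mp hx with h | h
  · obtain ⟨j, hj, hget⟩ := List.mem_iff_getElem.mp h
    have hji : j < i := by simpa using (lt_of_lt_of_le hj (by simp))
    have hjl : j < l.length := by have := hj; simp at this; omega
    exact ⟨j, hjl, by omega, by simpa [List.getElem_take] using hget⟩
  · obtain ⟨j, hj, hget⟩ := List.mem_iff_getElem.mp h
    have hjl : i + 1 + j < l.length := by have := hj; simp at this; omega
    exact ⟨i + 1 + j, hjl, by omega, by simpa [List.getElem_drop] using hget⟩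


theorem foldl_fun_congr {a b : Type} (l : List a) (f g : b -> a -> b) (init : b)
    (h : forall acc x, x ∈ l -> f acc x = g acc x) : l.foldl f init = l.foldl g init := by
  induction l generalizing init with
  | nil => rfl
  | cons a t ih =>
    simp only [List.foldl_cons, h init a (by simp)]
    exact ih _ (fun acc x hx => h acc x (by simp [hx]))

-- pyGet? + getD 0 on an in-range nonnegative index is plain list indexing
theorem pyGetD0 (xs : List Int) (i : Int) (h0 : 0 ≤ i) (h : i < xs.length) :
    (PySem.List.pyGet? xs i).getD 0 = xs[i.toNat]'(by omega) := by
  simp [PySem.List.pyGet?, PySem.List.pyIdx?, if_pos h0, if_pos h]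
  rw [List.getElem?_eq_getElem (by omega)]
  simp

-- A's nested append loop builds the flatMap of the off-diagonal sums
theorem nested_foldl_eq (l : List Int) (f : Int → Int → Int) :
    l.foldl (fun acc i => l.foldl (fun acc2 j => if i ≠ j then acc2 ++ [f i j] else acc2) acc) []
    = l.flatMap (fun i => (l.filter (fun j => decide (i ≠ j))).map (f i)) := by
  have hinner : ∀ (acc : List Int) (i : Int),
      l.foldl (fun acc2 j => if i ≠ j then acc2 ++ [f i j] else acc2) acc
        = acc ++ (l.filter (fun j => decide (i ≠ j))).map (f i) :=
    fun acc i => PySem.List.foldl_append_ite (fun j => i ≠ j) (f i) l acc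
  calc l.foldl (fun acc i => l.foldl (fun acc2 j => if i ≠ j then acc2 ++ [f i j] else acc2) acc) []
      = l.foldl (fun acc i => acc ++ (l.filter (fun j => decide (i ≠ j))).map (f i)) [] := by
        apply foldl_fun_congr
        exact fun acc i _ => hinner acc i
    _ = l.flatMap (fun i => (l.filter (fun j => decide (i ≠ j))).map (f i)) := by
        simpa using PySem.List.foldl_append_eq_flatMap (fun i => (l.filter (fun j => decide (i ≠ j))).map (f i)) l []

theorem main_case (A B : List Int) (n : Int) (hn2 : 2 ≤ n)
    (_hlA : n ≤ (A.length : Int)) (hlB : n ≤ (B.length : Int)) :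
    (let possible_sums :=
      (PySem.List.pyRange 0 n 1).foldl (fun acc i =>
        (PySem.List.pyRange 0 n 1).foldl (fun acc2 j =>
          if i ≠ j then
            acc2 ++ [(PySem.List.pyGet? A i).getD 0 + (PySem.List.pyGet? B j).getD 0]
          else acc2) acc) [];
    if possible_sums = [] then -1
    else (PySem.List.min? possible_sums (fun y => y)).getD 0)
    =
    (let Bp := PySem.List.slice B none (some n);
     let m := (PySem.List.min? Bp (fun y => y)).getD 0;
     let jb := (PySem.List.index? Bp m).getD 0;
     let m2 := (PySem.List.min? (PySem.List.slice Bp none (some (jb : Int)) ++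
                PySem.List.slice Bp (some ((jb : Int) + 1)) none) (fun y => y)).getD 0;
     (PySem.List.min? ((PySem.List.pyRange 0 n 1).map (fun i =>
        (PySem.List.pyGet? A i).getD 0 + (if i ≠ (jb : Int) then m else m2))) (fun y => y)).getD 0) := by
  have h0n : (0:Int) ≤ n := by omega
  have hlenB : n.toNat ≤ B.length := by omega
  simp only [PySem.List.slice_to B h0n]
  have hBpl : (B.take n.toNat).length = n.toNat := by simp; omega
  have hBpne : B.take n.toNat ≠ [] := by
    intro h; rw [h] at hBpl; simp at hBpl; omega
  obtain ⟨hmem, hmle⟩ := minD_mem_isMin (B.take n.toNat) hBpne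
  obtain ⟨k, hk⟩ := Option.isSome_iff_exists.mp
    ((PySem.List.index?_isSome_iff (B.take n.toNat) _).mpr hmem)
  simp only [hk, Option.getD_some]
  obtain ⟨hkl, hBk, -⟩ := PySem.List.getElem_of_index?_eq_some hk
  have hcast : ((k:Int) + 1) = ((k + 1 : Nat) : Int) := by push_cast; ring
  simp only [PySem.List.slice_to_natCast, hcast, PySem.List.slice_from_natCast]
  have hPl : ((B.take n.toNat).take k ++ (B.take n.toNat).drop (k+1)).length = n.toNat - 1 := by
    simp; omega
  have hPne : (B.take n.toNat).take k ++ (B.take n.toNat).drop (k+1) ≠ [] := by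
    intro h; rw [h] at hPl; simp at hPl; omega
  obtain ⟨hm2mem, hm2le⟩ := minD_mem_isMin _ hPne
  rw [nested_foldl_eq]
  -- bridge from pyGet? on B to indexing into the prefix B.take n.toNat
  have hbG : ∀ (j : Int) (h0 : 0 ≤ j) (hj : j < n),
      (PySem.List.pyGet? B j).getD 0 = (B.take n.toNat)[j.toNat]'(by omega) := by
    intro j h0 hj
    rw [pyGetD0 B j h0 (by omega), List.getElem_take]
  have hkn : (k:Int) < n := by omega
  -- the two candidate lists are mutually dominated, hence have equal minima
  have hLmem : (PySem.List.pyGet? A 0).getD 0 + (PySem.List.pyGet? B 1).getD 0 ∈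
      (PySem.List.pyRange 0 n 1).flatMap (fun i =>
        ((PySem.List.pyRange 0 n 1).filter (fun j => decide (i ≠ j))).map
          (fun j => (PySem.List.pyGet? A i).getD 0 + (PySem.List.pyGet? B j).getD 0)) := by
    refine List.mem_flatMap.mpr ⟨0, ?_, List.mem_map.mpr ⟨1, List.mem_filter.mpr ⟨?_, by decide⟩, rfl⟩⟩
    · exact (PySem.List.mem_pyRange_one).mpr ⟨le_refl _, by omega⟩
    · exact (PySem.List.mem_pyRange_one).mpr ⟨by omega, by omega⟩
  have hLne := List.ne_nil_of_mem hLmem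
  rw [if_neg hLne]
  have hMne : ((PySem.List.pyRange 0 n 1).map (fun i =>
      (PySem.List.pyGet? A i).getD 0 + (if i ≠ (k : Int) then
        (PySem.List.min? (B.take n.toNat) (fun y => y)).getD 0
      else (PySem.List.min? ((B.take n.toNat).take k ++ (B.take n.toNat).drop (k+1)) (fun y => y)).getD 0))) ≠ [] := by
    apply List.ne_nil_of_mem (a := (PySem.List.pyGet? A 0).getD 0 + _)
    exact List.mem_map.mpr ⟨0, (PySem.List.mem_pyRange_one).mpr ⟨le_refl _, by omega⟩, rfl⟩
  apply minD_eq_of_dominated _ _ hLne hMne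
  · -- every off-diagonal sum is dominated by a candidate of B's list
    intro x hx
    obtain ⟨i, hi, hx⟩ := List.mem_flatMap.mp hx
    obtain ⟨j, hj, rfl⟩ := List.mem_map.mp hx
    obtain ⟨hjr, hij⟩ := List.mem_filter.mp hj
    obtain ⟨hi0, hin⟩ := (PySem.List.mem_pyRange_one).mp hi
    obtain ⟨hj0, hjn⟩ := (PySem.List.mem_pyRange_one).mp hjr
    have hij' : i ≠ j := by simpa using hij
    refine ⟨_, List.mem_map.mpr ⟨i, hi, rfl⟩, ?_⟩
    apply Int.add_le_add_left
    rw [hbG j hj0 hjn]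
    by_cases hik : i ≠ (k:Int)
    · rw [if_pos hik]
      exact hmle _ (List.getElem_mem _)
    · rw [if_neg hik]
      rw [not_not] at hik
      have hjk : j.toNat ≠ k := by omega
      exact hm2le _ (mem_punctured_of_ne (B.take n.toNat) k j.toNat (by omega) hjk)
  · -- every candidate is dominated by an actual off-diagonal sum
    intro y hy
    obtain ⟨i, hi, rfl⟩ := List.mem_map.mp hy
    obtain ⟨hi0, hin⟩ := (PySem.List.mem_pyRange_one).mp hi
    by_cases hik : i ≠ (k:Int)
    · refine ⟨(PySem.List.pyGet? A i).getD 0 + (PySem.List.pyGet? B (k:Int)).getD 0,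
        List.mem_flatMap.mpr ⟨i, hi, List.mem_map.mpr ⟨(k:Int),
          List.mem_filter.mpr ⟨(PySem.List.mem_pyRange_one).mpr ⟨by omega, hkn⟩, by simpa using hik⟩, rfl⟩⟩, ?_⟩
      rw [if_pos hik, hbG (k:Int) (by omega) hkn]
      simp only [Int.toNat_natCast]
      rw [hBk]
    · rw [not_not] at hik
      obtain ⟨j', hj'l, hj'k, hBj'⟩ := exists_idx_of_mem_punctured (B.take n.toNat) k _ hm2mem
      refine ⟨(PySem.List.pyGet? A i).getD 0 + (PySem.List.pyGet? B (j':Int)).getD 0,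
        List.mem_flatMap.mpr ⟨i, hi, List.mem_map.mpr ⟨(j':Int),
          List.mem_filter.mpr ⟨(PySem.List.mem_pyRange_one).mpr ⟨by omega, by omega⟩, ?_⟩, rfl⟩⟩, ?_⟩
      · simp [hik]; omega
      · rw [if_neg (by simp [hik]), hbG (j':Int) (by omega) (by omega)]
        simp only [Int.toNat_natCast]
        rw [hBj']

-- ===== VERDICT (by name: the statement is the Claim_ definition above) =====
theorem get_min_sum_spec : Claim_equal_get_min_sum := by
  intro A B n _ hpre
  obtain ⟨hA, hB, hdisj⟩ := hpre
  unfold Spec_get_min_sum get_min_sum get_min_sum_alt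
  by_cases hC : (PySem.List.index? A ((PySem.List.min? A (fun y => y)).getD 0)).getD 0 ≠
      (PySem.List.index? B ((PySem.List.min? B (fun y => y)).getD 0)).getD 0
  · simp only [if_pos hC]
  · simp only [if_neg hC]
    by_cases hn : n ≤ 1
    · simp only [if_pos hn]
      have hps : (PySem.List.pyRange 0 n 1).foldl (fun acc i =>
          (PySem.List.pyRange 0 n 1).foldl (fun acc2 j =>
            if i ≠ j then
              acc2 ++ [(PySem.List.pyGet? A i).getD 0 + (PySem.List.pyGet? B j).getD 0]
            else acc2) acc) [] = [] := by
        rw [nested_foldl_eq]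
        by_cases h : n ≤ 0
        · rw [PySem.List.pyRange_one_eq_nil (by omega)]; rfl
        · have : n = 1 := by omega
          subst this
          have h1 : PySem.List.pyRange 0 1 1 = [0] := by
            simpa using PySem.List.pyRange_one_singleton (a := (0:Int))
          rw [h1]
          simp
      rw [hps]
      simp
    · simp only [if_neg hn]
      rcases hdisj with h | h | ⟨hlA, hlB⟩
      · exact absurd h hC
      · exact absurd h hn
      · exact main_case A B n (by omega) hlA hlB
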